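-- pv_equiv track=rewrite | github.com/danlkv/QTensor | scratchpad/bench/circontraction_new/mother.py | reorderData
-- ===== SOURCE A (Python) =====
-- from collections import defaultdict
--
-- def reorderData(data):
--
--     result = defaultdict(dict)
--
--     for function in data:
--         func_dict = defaultdict(list)
--
--         # func_dict = ref -> list(value)
--         for ref_val in data[function]:
--             reference = ref_val['reference']
--             value = ref_val['value']
--             func_dict[reference].append(value)
--
--         # result => ref -> {func1:[] func2:[]}
--         for ref in func_dict:
--             times = func_dict[ref]
--             result[ref][function] = times
--
--     return result
-- ===== SOURCE B (Python) =====
-- from collections import defaultdict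
--
-- def reorderData(data):
--     # pass 1: distinct references in order of first appearance
--     refs = []
--     for records in data.values():
--         for rv in records:
--             if rv['reference'] not in refs:
--                 refs.append(rv['reference'])
--     # pass 2: assemble each reference's function->values dict by filtering the whole data
--     result = defaultdict(dict)
--     for ref in refs:
--         result[ref] = {
--             function: [rv['value'] for rv in records if rv['reference'] == ref]
--             for function, records in data.items()
--             if any(rv['reference'] == ref for rv in records)
--         }
--     return result
-- ===== Notes on version B (the rewrite author's own statement) =====
-- stated objective: alternative
-- what changed: Replaces A's incremental function-major accumulation (per-function table then copy into the result) by a reference-major two-pass algorithm: first collect the distinct references in order of first appearance, then build each reference's inner function->values dict directly with filtering comprehensions over the whole data; it trades O(n) accumulation for O(R*n) filtering.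
import Mathlib
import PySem

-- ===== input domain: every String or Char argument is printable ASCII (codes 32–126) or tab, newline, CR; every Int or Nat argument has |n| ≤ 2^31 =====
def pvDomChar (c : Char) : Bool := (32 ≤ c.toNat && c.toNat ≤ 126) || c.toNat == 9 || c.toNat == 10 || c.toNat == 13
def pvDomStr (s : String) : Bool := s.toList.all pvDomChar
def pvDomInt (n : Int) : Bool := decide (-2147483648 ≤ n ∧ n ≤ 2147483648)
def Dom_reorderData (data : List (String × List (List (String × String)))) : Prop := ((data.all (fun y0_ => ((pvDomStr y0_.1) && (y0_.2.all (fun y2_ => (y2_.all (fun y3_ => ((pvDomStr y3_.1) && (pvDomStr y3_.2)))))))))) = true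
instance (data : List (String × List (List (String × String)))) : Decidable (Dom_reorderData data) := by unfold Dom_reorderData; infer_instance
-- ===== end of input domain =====

-- B replaces A's function-major incremental accumulation by a reference-major two-pass
-- algorithm (collect references, then filter per reference); same return value, objective: alternative.


-- ===== PORT A =====
-- rec[k] on a record dict (first match; Python raises KeyError when absent — Pre_ excludes that)
def recGet (rec : List (String × String)) (k : String) : String :=
  match rec with
  | [] => ""
  | (k', v) :: t => if k' = k then v else recGet t k

-- data[function] (first match; under Pre_'s unique keys this is the entry's own value)
def dataGet (data : List (String × List (List (String × String)))) (f : String) : List (List (String × String)) :=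
  match data with
  | [] => []
  | (k, v) :: t => if k = f then v else dataGet t f

-- defaultdict(list): fd[r].append(v)
def fdAppend (fd : List (String × List String)) (r v : String) : List (String × List String) :=
  match fd with
  | [] => [(r, [v])]
  | (k, vs) :: t => if k = r then (k, vs ++ [v]) :: t else (k, vs) :: fdAppend t r v

-- plain dict assignment d[f] = ts (overwrite keeps position, new key appends)
def dSet (d : List (String × List String)) (f : String) (ts : List String) : List (String × List String) :=
  match d with
  | [] => [(f, ts)]
  | (k, _vs) :: t => if k = f then (k, ts) :: t else (k, _vs) :: dSet t f ts

-- defaultdict(dict): result[ref][f] = ts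
def resSet (res : List (String × List (String × List String))) (ref f : String) (ts : List String) : List (String × List (String × List String)) :=
  match res with
  | [] => [(ref, [(f, ts)])]
  | (k, d) :: t => if k = ref then (k, dSet d f ts) :: t else (k, d) :: resSet t ref f ts

def reorderData (data : List (String × List (List (String × String)))) : List (String × List (String × List String)) :=
  data.foldl (fun result p =>
    let fd := (dataGet data p.1).foldl
      (fun fd rv => fdAppend fd (recGet rv "reference") (recGet rv "value")) []
    fd.foldl (fun result q => resSet result q.1 p.1 q.2) result) []

-- ===== PORT B =====
-- pass 1: 'if rv["reference"] not in refs: refs.append(...)'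
def addRef (refs : List String) (rv : List (String × String)) : List String :=
  if recGet rv "reference" ∈ refs then refs else refs ++ [recGet rv "reference"]

def collectRefs (data : List (String × List (List (String × String)))) : List String :=
  data.foldl (fun refs p => p.2.foldl addRef refs) []

-- '[rv["value"] for rv in records if rv["reference"] == ref]'
def refVals (r : String) (es : List (List (String × String))) : List String :=
  (es.filter (fun rv => recGet rv "reference" == r)).map (fun rv => recGet rv "value")

-- the dict comprehension '{f: [...] for f, records in data.items() if any(...)}'
-- (exact for unique outer keys, which a Python dict guarantees and Pre_ states)
def innerFor (data : List (String × List (List (String × String)))) (r : String) : List (String × List String) :=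
  (data.filter (fun p => p.2.any (fun rv => recGet rv "reference" == r))).map
    (fun p => (p.1, refVals r p.2))

def reorderData_alt (data : List (String × List (List (String × String)))) : List (String × List (String × List String)) :=
  (collectRefs data).map (fun r => (r, innerFor data r))

-- ===== PRECONDITION & SPEC =====
-- Pre_ excludes (a) records missing a 'reference' or 'value' key, where the Python A raises KeyError,
-- and (b) association lists with duplicate keys (outer or inside a record), which cannot arise from a
-- Python dict — the assoc-list encoding is ambiguous there (Python's dict construction keeps the LAST
-- duplicate, the first-match lookup convention the ports use keeps the first).
def Pre_reorderData (data : List (String × List (List (String × String)))) : Prop :=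
  (data.map Prod.fst).Nodup ∧
  ∀ p ∈ data, ∀ rv ∈ p.2,
    (rv.map Prod.fst).Nodup ∧ "reference" ∈ rv.map Prod.fst ∧ "value" ∈ rv.map Prod.fst
instance (data : List (String × List (List (String × String)))) : Decidable (Pre_reorderData data) := by unfold Pre_reorderData; infer_instance

def pvWitness_reorderData : (List (String × List (List (String × String)))) :=
  [("tnet", [[("reference", "r1"), ("value", "0.5")], [("reference", "r2"), ("value", "7")]]),
   ("qtree", [[("reference", "r1"), ("value", "3")]])]

def Spec_reorderData (data : List (String × List (List (String × String)))) (out : List (String × List (String × List String))) : Prop := out = reorderData_alt data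
instance (data : List (String × List (List (String × String)))) (out : List (String × List (String × List String))) : Decidable (Spec_reorderData data out) := by unfold Spec_reorderData; infer_instance

-- ===== CLAIM (what is proved, stated in full; the proofs are below) =====
def Claim_equal_reorderData : Prop := ∀ (data : List (String × List (List (String × String)))), Dom_reorderData data → Pre_reorderData data → Spec_reorderData data (reorderData data)

-- ===== LEMMAS AND PROOFS =====

-- The proof goes through an intermediate direct-accumulation fold (resAppend below):
-- A's build-table-then-copy equals it (first half), and it equals B's reference-major
-- map (second half, via the representation invariant res = R.map (r, g r)).

def resAppend (res : List (String × List (String × List String))) (ref f v : String) : List (String × List (String × List String)) :=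
  match res with
  | [] => [(ref, [(f, [v])])]
  | (k, d) :: t => if k = ref then (k, fdAppend d f v) :: t else (k, d) :: resAppend t ref f v

-- first-match lookup of an outer key in the result
def resGet? (res : List (String × List (String × List String))) (r : String) : Option (List (String × List String)) :=
  match res with
  | [] => none
  | (k, d) :: t => if k = r then some d else resGet? t r

-- "function name g does not yet occur in the inner dict stored at key r"
def FreshAt (g r : String) (res : List (String × List (String × List String))) : Prop :=
  ∀ d, resGet? res r = some d → ∀ e ∈ d, e.1 ≠ g

-- "function name g occurs in no inner dict"
def FreshAll (g : String) (res : List (String × List (String × List String))) : Prop :=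
  ∀ q ∈ res, ∀ e ∈ q.2, e.1 ≠ g

theorem freshAt_of_freshAll {g r : String} {res : List (String × List (String × List String))}
    (h : FreshAll g res) : FreshAt g r res := by
  induction res with
  | nil => intro d hd; simp [resGet?] at hd
  | cons q t ih =>
    obtain ⟨k, d0⟩ := q
    intro d hd
    by_cases hk : k = r
    · have hdd : d0 = d := by simpa [resGet?, hk] using hd
      subst hdd
      exact h (k, d0) (by simp)
    · have hd' : resGet? t r = some d := by simpa [resGet?, hk] using hd
      exact ih (fun q hq => h q (List.mem_cons_of_mem _ hq)) d hd'

theorem dSet_singleton_eq_fdAppend (d : List (String × List String)) (f v : String)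
    (h : ∀ e ∈ d, e.1 ≠ f) : dSet d f [v] = fdAppend d f v := by
  induction d with
  | nil => rfl
  | cons q t ih =>
    obtain ⟨k, vs⟩ := q
    have hk : k ≠ f := h (k, vs) (by simp)
    simp only [dSet, fdAppend, if_neg hk, List.cons.injEq, true_and]
    exact ih (fun e he => h e (List.mem_cons_of_mem _ he))

theorem fdAppend_dSet (d : List (String × List String)) (f v : String) (vs : List String)
    (h : ∀ e ∈ d, e.1 ≠ f) : fdAppend (dSet d f vs) f v = dSet d f (vs ++ [v]) := by
  induction d with
  | nil => simp [dSet, fdAppend]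
  | cons q t ih =>
    obtain ⟨k, w⟩ := q
    have hk : k ≠ f := h (k, w) (by simp)
    simp only [dSet, fdAppend, if_neg hk, List.cons.injEq, true_and]
    exact ih (fun e he => h e (List.mem_cons_of_mem _ he))

theorem resSet_singleton_eq_resAppend (res : List (String × List (String × List String)))
    (r f v : String) (h : FreshAt f r res) : resSet res r f [v] = resAppend res r f v := by
  induction res with
  | nil => rfl
  | cons q t ih =>
    obtain ⟨k, d⟩ := q
    by_cases hk : k = r
    · simp only [resSet, resAppend, if_pos hk, List.cons.injEq]
      refine ⟨?_, trivial⟩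
      rw [dSet_singleton_eq_fdAppend d f v (h d (by simp [resGet?, hk]))]
    · simp only [resSet, resAppend, if_neg hk, List.cons.injEq, true_and]
      exact ih (fun d0 hd0 => h d0 (by simpa [resGet?, hk] using hd0))

theorem resAppend_resSet (res : List (String × List (String × List String))) (r f v : String)
    (vs : List String) (h : FreshAt f r res) :
    resAppend (resSet res r f vs) r f v = resSet res r f (vs ++ [v]) := by
  induction res with
  | nil => simp [resSet, resAppend, fdAppend]
  | cons q t ih =>
    obtain ⟨k, d⟩ := q
    by_cases hk : k = r
    · simp only [resSet, resAppend, if_pos hk, List.cons.injEq]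
      refine ⟨?_, trivial⟩
      rw [fdAppend_dSet d f v vs (h d (by simp [resGet?, hk]))]
    · simp only [resSet, resAppend, if_neg hk, List.cons.injEq, true_and]
      exact ih (fun d0 hd0 => h d0 (by simpa [resGet?, hk] using hd0))

theorem keys_resSet (res : List (String × List (String × List String))) (k f : String)
    (ts : List String) :
    (resSet res k f ts).map Prod.fst
      = if k ∈ res.map Prod.fst then res.map Prod.fst else res.map Prod.fst ++ [k] := by
  induction res with
  | nil => simp [resSet]
  | cons q t ih =>
    obtain ⟨k0, d⟩ := q
    by_cases hk : k0 = k
    · simp [resSet, hk]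
    · simp only [resSet, if_neg hk, List.map_cons, ih, List.mem_cons]
      have : ¬ k = k0 := fun h => hk h.symm
      by_cases hm : k ∈ t.map Prod.fst <;> simp [hm, this]

theorem mem_keys_resSet (res : List (String × List (String × List String))) (r k f : String)
    (ts : List String) (h : r ∈ res.map Prod.fst ∨ r = k) :
    r ∈ (resSet res k f ts).map Prod.fst := by
  rw [keys_resSet]
  rcases h with h | h
  · split <;> simp [h]
  · subst h
    split <;> simp_all

theorem resAppend_resSet_comm (res : List (String × List (String × List String)))
    (r k f v : String) (ts : List String) (hr : r ∈ res.map Prod.fst) (hk : k ≠ r) :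
    resAppend (resSet res k f ts) r f v = resSet (resAppend res r f v) k f ts := by
  induction res with
  | nil => simp at hr
  | cons q t ih =>
    obtain ⟨a, d⟩ := q
    by_cases hak : a = k
    · subst hak
      simp [resSet, resAppend, hk]
    · by_cases har : a = r
      · subst har
        have hrk : ¬ a = k := hak
        simp [resSet, resAppend, hrk]
      · have hrt : r ∈ t.map Prod.fst := by
          rcases (by simpa only [List.map_cons, List.mem_cons] using hr : r = a ∨ r ∈ t.map Prod.fst) with h | h
          · exact absurd h.symm har
          · exact h
        simp only [resSet, resAppend, if_neg hak, if_neg har, List.cons.injEq, true_and]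
        exact ih hrt

theorem resAppend_foldl_resSet (S : List (String × List String))
    (res : List (String × List (String × List String))) (r f v : String)
    (hr : r ∈ res.map Prod.fst) (hS : ∀ q ∈ S, q.1 ≠ r) :
    resAppend (S.foldl (fun acc q => resSet acc q.1 f q.2) res) r f v
      = S.foldl (fun acc q => resSet acc q.1 f q.2) (resAppend res r f v) := by
  induction S generalizing res with
  | nil => rfl
  | cons q t ih =>
    obtain ⟨k, ts⟩ := q
    have hkr : k ≠ r := hS (k, ts) (by simp)
    simp only [List.foldl_cons]
    rw [ih (resSet res k f ts) (mem_keys_resSet res r k f ts (Or.inl hr))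
        (fun q hq => hS q (List.mem_cons_of_mem _ hq))]
    rw [resAppend_resSet_comm res r k f v ts hr hkr]

theorem resGet?_resSet_ne (res : List (String × List (String × List String))) (r k f : String)
    (ts : List String) (hk : k ≠ r) : resGet? (resSet res k f ts) r = resGet? res r := by
  induction res with
  | nil => simp [resSet, resGet?, hk]
  | cons q t ih =>
    obtain ⟨a, d⟩ := q
    by_cases hak : a = k
    · subst hak
      simp [resSet, resGet?, hk]
    · by_cases har : a = r
      · have hrk : ¬ r = k := fun h => hk h.symm
        simp [resSet, resGet?, har, hrk]
      · simp only [resSet, resGet?, if_neg hak, if_neg har]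
        exact ih

theorem keys_fdAppend (fd : List (String × List String)) (r v : String) :
    (fdAppend fd r v).map Prod.fst
      = if r ∈ fd.map Prod.fst then fd.map Prod.fst else fd.map Prod.fst ++ [r] := by
  induction fd with
  | nil => simp [fdAppend]
  | cons q t ih =>
    obtain ⟨k, vs⟩ := q
    by_cases hk : k = r
    · simp [fdAppend, hk]
    · simp only [fdAppend, if_neg hk, List.map_cons, ih, List.mem_cons]
      have : ¬ r = k := fun h => hk h.symm
      by_cases hm : r ∈ t.map Prod.fst <;> simp [hm, this]

theorem keys_fdAppend_nodup (fd : List (String × List String)) (r v : String)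
    (h : (fd.map Prod.fst).Nodup) : ((fdAppend fd r v).map Prod.fst).Nodup := by
  rw [keys_fdAppend]
  split
  · exact h
  · next hm =>
    rw [List.nodup_append]
    exact ⟨h, List.nodup_singleton r, fun a ha b hb hab => hm ((hab.trans (List.mem_singleton.mp hb)) ▸ ha)⟩

theorem mem_fdAppend_fst {d : List (String × List String)} {f v : String}
    {e : String × List String} (he : e ∈ fdAppend d f v) : e.1 = f ∨ e.1 ∈ d.map Prod.fst := by
  have h1 : e.1 ∈ (fdAppend d f v).map Prod.fst := List.mem_map_of_mem he
  rw [keys_fdAppend] at h1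
  split at h1
  · exact Or.inr h1
  · rcases List.mem_append.mp h1 with h | h
    · exact Or.inr h
    · exact Or.inl (List.mem_singleton.mp h)

theorem nodup_keys_fdFold (es : List (List (String × String))) (fd : List (String × List String))
    (h : (fd.map Prod.fst).Nodup) :
    ((es.foldl (fun fd rv => fdAppend fd (recGet rv "reference") (recGet rv "value")) fd).map Prod.fst).Nodup := by
  induction es generalizing fd with
  | nil => exact h
  | cons rv t ih => exact ih _ (keys_fdAppend_nodup fd _ _ h)

-- writing fd after one more append = appending once into the already-written result
theorem write_fdAppend (fd : List (String × List String))
    (res : List (String × List (String × List String))) (r f v : String)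
    (hnd : (fd.map Prod.fst).Nodup) (hf : FreshAt f r res) :
    (fdAppend fd r v).foldl (fun acc q => resSet acc q.1 f q.2) res
      = resAppend (fd.foldl (fun acc q => resSet acc q.1 f q.2) res) r f v := by
  induction fd generalizing res with
  | nil =>
    simp only [fdAppend, List.foldl_cons, List.foldl_nil]
    exact resSet_singleton_eq_resAppend res r f v hf
  | cons q t ih =>
    obtain ⟨k, vs⟩ := q
    by_cases hk : k = r
    · subst hk
      have hkt : k ∉ t.map Prod.fst := by
        simp only [List.map_cons, List.nodup_cons] at hnd
        exact hnd.1
      have hrt : ∀ q ∈ t, q.1 ≠ k := by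
        intro q hq h'
        exact hkt (h' ▸ List.mem_map_of_mem hq)
      have hfd : fdAppend ((k, vs) :: t) k v = (k, vs ++ [v]) :: t := by simp [fdAppend]
      rw [hfd]
      simp only [List.foldl_cons]
      rw [resAppend_foldl_resSet t (resSet res k f vs) k f v
            (mem_keys_resSet res k k f vs (Or.inr rfl)) hrt,
          resAppend_resSet res k f v vs hf]
    · simp only [fdAppend, if_neg hk, List.foldl_cons]
      have hnd' : (t.map Prod.fst).Nodup := by
        simp only [List.map_cons, List.nodup_cons] at hnd
        exact hnd.2
      have hf' : FreshAt f r (resSet res k f vs) := by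
        intro d hd
        rw [resGet?_resSet_ne res r k f vs hk] at hd
        exact hf d hd
      exact ih (resSet res k f vs) hnd' hf'

-- one function processed: A's build-table-then-copy = direct accumulation
theorem step_eq (f : String) (es : List (List (String × String)))
    (res : List (String × List (String × List String))) (h : FreshAll f res) :
    ((es.foldl (fun fd rv => fdAppend fd (recGet rv "reference") (recGet rv "value")) []).foldl
        (fun acc q => resSet acc q.1 f q.2) res)
      = es.foldl (fun acc rv => resAppend acc (recGet rv "reference") f (recGet rv "value")) res := by
  induction es using List.reverseRecOn with
  | nil => rfl
  | append_singleton es rv ih =>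
    rw [List.foldl_append, List.foldl_append]
    simp only [List.foldl_cons, List.foldl_nil]
    rw [write_fdAppend _ res _ f _ (nodup_keys_fdFold es [] (by simp)) (freshAt_of_freshAll h), ih]

theorem freshAll_resAppend (g r f v : String) (res : List (String × List (String × List String)))
    (hg : g ≠ f) (h : FreshAll g res) : FreshAll g (resAppend res r f v) := by
  induction res with
  | nil =>
    intro q hq e he
    simp only [resAppend, List.mem_singleton] at hq
    subst hq
    simp only [List.mem_singleton] at he
    subst he
    exact Ne.symm hg
  | cons p t ih =>
    obtain ⟨k, d⟩ := p
    intro q hq e he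
    by_cases hk : k = r
    · simp only [resAppend, if_pos hk] at hq
      rcases List.mem_cons.mp hq with rfl | hq'
      · rcases mem_fdAppend_fst he with h1 | h1
        · exact h1 ▸ Ne.symm hg
        · obtain ⟨e', he', heq⟩ := List.mem_map.mp h1
          exact heq ▸ h (k, d) (by simp) e' he'
      · exact h q (List.mem_cons_of_mem _ hq') e he
    · simp only [resAppend, if_neg hk] at hq
      rcases List.mem_cons.mp hq with rfl | hq'
      · exact h (k, d) (by simp) e he
      · exact ih (fun q hq e he => h q (List.mem_cons_of_mem _ hq) e he) q hq' e he

theorem freshAll_foldl_resAppend (g f : String) (es : List (List (String × String)))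
    (res : List (String × List (String × List String))) (hg : g ≠ f) (h : FreshAll g res) :
    FreshAll g (es.foldl (fun acc rv => resAppend acc (recGet rv "reference") f (recGet rv "value")) res) := by
  induction es generalizing res with
  | nil => exact h
  | cons rv t ih => exact ih _ (freshAll_resAppend g _ f _ res hg h)

theorem dataGet_eq (data : List (String × List (List (String × String))))
    (p : String × List (List (String × String))) (hnd : (data.map Prod.fst).Nodup)
    (hp : p ∈ data) : dataGet data p.1 = p.2 := by
  induction data with
  | nil => cases hp
  | cons q t ih =>
    obtain ⟨k, w⟩ := q
    simp only [List.map_cons, List.nodup_cons] at hnd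
    rcases List.mem_cons.mp hp with rfl | hp'
    · simp [dataGet]
    · have hne : k ≠ p.1 := by
        intro h'
        exact hnd.1 (h' ▸ List.mem_map_of_mem hp')
      simp only [dataGet, if_neg hne]
      exact ih hnd.2 hp'

theorem main_fold (data l : List (String × List (List (String × String))))
    (res : List (String × List (String × List String)))
    (h1 : ∀ p ∈ l, dataGet data p.1 = p.2)
    (h2 : (l.map Prod.fst).Nodup)
    (h3 : ∀ p ∈ l, FreshAll p.1 res) :
    l.foldl (fun result p =>
        ((dataGet data p.1).foldl
          (fun fd rv => fdAppend fd (recGet rv "reference") (recGet rv "value")) []).foldl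
          (fun acc q => resSet acc q.1 p.1 q.2) result) res
      = l.foldl (fun result p =>
          p.2.foldl (fun acc rv => resAppend acc (recGet rv "reference") p.1 (recGet rv "value")) result) res := by
  induction l generalizing res with
  | nil => rfl
  | cons p t ih =>
    simp only [List.foldl_cons]
    rw [h1 p (by simp), step_eq p.1 p.2 res (h3 p (by simp))]
    simp only [List.map_cons, List.nodup_cons] at h2
    refine ih _ (fun q hq => h1 q (List.mem_cons_of_mem _ hq)) h2.2 ?_
    intro q hq
    have hqp : q.1 ≠ p.1 := by
      intro h'
      exact h2.1 (h' ▸ List.mem_map_of_mem hq)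
    exact freshAll_foldl_resAppend q.1 p.1 p.2 res hqp (h3 q (List.mem_cons_of_mem _ hq))

-- ===== second half: direct accumulation = B's reference-major map =====

theorem addRef_mem (refs : List String) (rv : List (String × String))
    (h : recGet rv "reference" ∈ refs) : addRef refs rv = refs := by
  unfold addRef; rw [if_pos h]

theorem addRef_not_mem (refs : List String) (rv : List (String × String))
    (h : recGet rv "reference" ∉ refs) : addRef refs rv = refs ++ [recGet rv "reference"] := by
  unfold addRef; rw [if_neg h]

theorem mem_foldl_addRef {r : String} (es : List (List (String × String))) (refs : List String)
    (h : r ∈ refs) : r ∈ es.foldl addRef refs := by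
  induction es generalizing refs with
  | nil => exact h
  | cons rv t ih =>
    refine ih _ ?_
    unfold addRef
    split
    · exact h
    · exact List.mem_append_left _ h

theorem ref_mem_foldl_addRef {rv : List (String × String)} (es : List (List (String × String)))
    (refs : List String) (h : rv ∈ es) : recGet rv "reference" ∈ es.foldl addRef refs := by
  induction es generalizing refs with
  | nil => cases h
  | cons rv0 t ih =>
    rcases List.mem_cons.mp h with rfl | h'
    · refine mem_foldl_addRef t _ ?_
      unfold addRef
      split
      · assumption
      · simp
    · exact ih _ h'

theorem nodup_foldl_addRef (es : List (List (String × String))) (refs : List String)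
    (h : refs.Nodup) : (es.foldl addRef refs).Nodup := by
  induction es generalizing refs with
  | nil => exact h
  | cons rv t ih =>
    refine ih _ ?_
    unfold addRef
    split
    · exact h
    · next hm => simpa using List.Nodup.append h (List.nodup_singleton _) (by simpa using hm)

theorem refVals_append (r : String) (es : List (List (String × String))) (rv : List (String × String)) :
    refVals r (es ++ [rv])
      = refVals r es ++ (if recGet rv "reference" == r then [recGet rv "value"] else []) := by
  unfold refVals
  rw [List.filter_append, List.map_append]
  congr 1
  by_cases h : (recGet rv "reference" == r) = true
  · simp [h]
  · simp [h]

theorem exists_of_refVals_ne (r : String) (es : List (List (String × String)))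
    (h : refVals r es ≠ []) : ∃ rv ∈ es, recGet rv "reference" = r := by
  unfold refVals at h
  have h2 : es.filter (fun rv => recGet rv "reference" == r) ≠ [] := by
    intro h3; exact h (by rw [h3]; rfl)
  obtain ⟨rv, hrv⟩ := List.exists_mem_of_ne_nil _ h2
  have := List.mem_filter.mp hrv
  exact ⟨rv, this.1, by simpa using this.2⟩


theorem fdAppend_fresh (d : List (String × List String)) (f v : String)
    (h : ∀ e ∈ d, e.1 ≠ f) : fdAppend d f v = d ++ [(f, [v])] := by
  induction d with
  | nil => rfl
  | cons q t ih =>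
    obtain ⟨k, vs⟩ := q
    have hk : k ≠ f := h (k, vs) (by simp)
    simp only [fdAppend, if_neg hk, List.cons_append, List.cons.injEq, true_and]
    exact ih (fun e he => h e (List.mem_cons_of_mem _ he))

theorem fdAppend_last (d : List (String × List String)) (f v : String) (vs : List String)
    (h : ∀ e ∈ d, e.1 ≠ f) : fdAppend (d ++ [(f, vs)]) f v = d ++ [(f, vs ++ [v])] := by
  induction d with
  | nil => simp [fdAppend]
  | cons q t ih =>
    obtain ⟨k, w⟩ := q
    have hk : k ≠ f := h (k, w) (by simp)
    simp only [List.cons_append, fdAppend, if_neg hk, List.cons.injEq, true_and]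
    exact ih (fun e he => h e (List.mem_cons_of_mem _ he))

-- the representation step: one resAppend on a list of shape R.map (fun r => (r, g r))
theorem resAppend_map (R : List String) (g : String → List (String × List String))
    (r0 f v : String) (hR : R.Nodup) :
    resAppend (R.map (fun r => (r, g r))) r0 f v
      = if r0 ∈ R then R.map (fun r => (r, if r = r0 then fdAppend (g r) f v else g r))
        else R.map (fun r => (r, g r)) ++ [(r0, [(f, [v])])] := by
  induction R with
  | nil => simp [resAppend]
  | cons a R ih =>
    simp only [List.nodup_cons] at hR
    by_cases ha : a = r0
    · subst ha
      simp only [List.map_cons, resAppend, List.mem_cons, true_or, if_pos,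
        List.cons.injEq, true_and]
      refine (List.map_congr_left ?_).symm
      intro r hr
      have : r ≠ a := fun h => hR.1 (h ▸ hr)
      simp [this]
    · simp only [List.map_cons, resAppend, if_neg ha, ih hR.2, List.mem_cons]
      have hna : ¬ r0 = a := fun h => ha h.symm
      by_cases hm : r0 ∈ R
      · simp [hm, hna]
      · simp [hm, hna]

-- processing one function's records over a represented result
theorem func_fold (f : String) (es : List (List (String × String))) (R : List String)
    (g : String → List (String × List String)) (hR : R.Nodup)
    (hf : ∀ r, ∀ e ∈ g r, e.1 ≠ f) (hg0 : ∀ r, r ∉ R → g r = []) :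
    es.foldl (fun res rv => resAppend res (recGet rv "reference") f (recGet rv "value"))
        (R.map (fun r => (r, g r)))
      = (es.foldl addRef R).map
          (fun r => (r, g r ++ if refVals r es = [] then [] else [(f, refVals r es)])) := by
  induction es using List.reverseRecOn with
  | nil =>
    simp only [List.foldl_nil]
    refine List.map_congr_left ?_
    intro r _
    simp [refVals]
  | append_singleton es rv ih =>
    rw [List.foldl_append, List.foldl_append]
    simp only [List.foldl_cons, List.foldl_nil, ih]
    rw [resAppend_map (es.foldl addRef R)
        (fun r => g r ++ if refVals r es = [] then [] else [(f, refVals r es)])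
        (recGet rv "reference") f (recGet rv "value") (nodup_foldl_addRef es R hR)]
    by_cases hm : recGet rv "reference" ∈ es.foldl addRef R
    · rw [if_pos hm]
      rw [addRef_mem _ _ hm]
      refine List.map_congr_left ?_
      intro r hr
      simp only [Prod.mk.injEq, true_and]
      rw [refVals_append]
      by_cases hrr : r = recGet rv "reference"
      · rw [if_pos hrr, hrr]
        by_cases hvs : refVals (recGet rv "reference") es = []
        · have h1 : fdAppend (g (recGet rv "reference")) f (recGet rv "value")
              = g (recGet rv "reference") ++ [(f, [recGet rv "value"])] :=
            fdAppend_fresh _ f _ (hf _)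
          simp [hvs, h1]
        · have h1 : fdAppend (g (recGet rv "reference") ++ [(f, refVals (recGet rv "reference") es)])
                f (recGet rv "value")
              = g (recGet rv "reference") ++ [(f, refVals (recGet rv "reference") es ++ [recGet rv "value"])] :=
            fdAppend_last _ f _ _ (hf _)
          simp [hvs, h1]
      · rw [if_neg hrr]
        have hb : ¬ (recGet rv "reference" == r) = true := by
          simpa using fun h => hrr h.symm
        simp [hb]
    · rw [if_neg hm]
      rw [addRef_not_mem _ _ hm, List.map_append]
      congr 1
      · refine List.map_congr_left ?_
        intro r hr
        have hb : ¬ (recGet rv "reference" == r) = true := by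
          intro h
          rw [beq_iff_eq] at h
          exact hm (by rw [h]; exact hr)
        rw [refVals_append]
        simp [hb]
      · have hg : g (recGet rv "reference") = [] := hg0 _ (fun h => hm (mem_foldl_addRef es R h))
        have hvs : refVals (recGet rv "reference") es = [] := by
          by_contra hne
          obtain ⟨rv', hrv', heq⟩ := exists_of_refVals_ne _ es hne
          exact hm (heq ▸ ref_mem_foldl_addRef es R hrv')
        simp [refVals_append, hvs, hg]

theorem innerFor_append (L : List (String × List (List (String × String))))
    (f : String) (es : List (List (String × String))) (r : String) :
    innerFor (L ++ [(f, es)]) r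
      = innerFor L r ++ if refVals r es = [] then [] else [(f, refVals r es)] := by
  unfold innerFor
  rw [List.filter_append, List.map_append]
  congr 1
  by_cases hvs : refVals r es = []
  · rw [if_pos hvs]
    have : ¬ es.any (fun rv => recGet rv "reference" == r) = true := by
      simp only [List.any_eq_true, not_exists, not_and]
      intro rv hrv hb
      have : rv ∈ es.filter (fun rv => recGet rv "reference" == r) := List.mem_filter.mpr ⟨hrv, hb⟩
      rw [show es.filter (fun rv => recGet rv "reference" == r) = [] from
        by unfold refVals at hvs; exact List.map_eq_nil_iff.mp hvs] at this
      cases this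
    simp [List.filter, this]
  · rw [if_neg hvs]
    obtain ⟨rv, hrv, heq⟩ := exists_of_refVals_ne r es hvs
    have : es.any (fun rv => recGet rv "reference" == r) = true :=
      List.any_eq_true.mpr ⟨rv, hrv, by simp [heq]⟩
    simp [List.filter, this]

theorem innerFor_keys (L : List (String × List (List (String × String)))) (r : String)
    {e : String × List String} (he : e ∈ innerFor L r) : e.1 ∈ L.map Prod.fst := by
  unfold innerFor at he
  obtain ⟨p, hp, heq⟩ := List.mem_map.mp he
  have := List.mem_filter.mp hp
  exact heq ▸ List.mem_map_of_mem this.1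


theorem mem_foldl_outer {r : String} (L : List (String × List (List (String × String))))
    (refs : List String) (h : r ∈ refs) :
    r ∈ L.foldl (fun refs p => p.2.foldl addRef refs) refs := by
  induction L generalizing refs with
  | nil => exact h
  | cons q t ih => exact ih _ (mem_foldl_addRef q.2 refs h)

theorem ref_mem_outer_foldl {rv : List (String × String)}
    {p : String × List (List (String × String))} (L : List (String × List (List (String × String))))
    (refs : List String) (hp : p ∈ L) (hrv : rv ∈ p.2) :
    recGet rv "reference" ∈ L.foldl (fun refs p => p.2.foldl addRef refs) refs := by
  induction L generalizing refs with
  | nil => cases hp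
  | cons q t ih =>
    rcases List.mem_cons.mp hp with rfl | hp'
    · exact mem_foldl_outer t _ (ref_mem_foldl_addRef p.2 refs hrv)
    · exact ih _ hp'

theorem innerFor_nil_of_not_mem (L : List (String × List (List (String × String)))) (r : String)
    (h : r ∉ collectRefs L) : innerFor L r = [] := by
  unfold innerFor
  rw [List.map_eq_nil_iff, List.filter_eq_nil_iff]
  intro p hp hb
  obtain ⟨rv, hrv, heq⟩ := List.any_eq_true.mp hb
  apply h
  have : recGet rv "reference" = r := by simpa using heq
  rw [← this]
  exact ref_mem_outer_foldl L [] hp hrv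

theorem nodup_collectRefs (L : List (String × List (List (String × String)))) :
    (collectRefs L).Nodup := by
  unfold collectRefs
  have : ∀ (refs : List String), refs.Nodup →
      (L.foldl (fun refs p => p.2.foldl addRef refs) refs).Nodup := by
    induction L with
    | nil => exact fun refs h => h
    | cons q t ih => exact fun refs h => ih _ (nodup_foldl_addRef q.2 refs h)
  exact this [] (List.nodup_nil)

theorem outer_fold (data : List (String × List (List (String × String))))
    (h : (data.map Prod.fst).Nodup) :
    data.foldl (fun res p =>
        p.2.foldl (fun acc rv => resAppend acc (recGet rv "reference") p.1 (recGet rv "value")) res) []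
      = (collectRefs data).map (fun r => (r, innerFor data r)) := by
  induction data using List.reverseRecOn with
  | nil => rfl
  | append_singleton L p ih =>
    obtain ⟨f, es⟩ := p
    have hL : (L.map Prod.fst).Nodup ∧ f ∉ L.map Prod.fst := by
      rw [List.map_append, List.nodup_append] at h
      refine ⟨h.1, fun hm => ?_⟩
      exact h.2.2 f hm f (by simp) rfl
    rw [List.foldl_append]
    simp only [List.foldl_cons, List.foldl_nil]
    rw [ih hL.1]
    rw [func_fold f es (collectRefs L) (innerFor L)
        (nodup_collectRefs L)
        (fun r e he h' => hL.2 (h' ▸ innerFor_keys L r he))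
        (fun r hr => innerFor_nil_of_not_mem L r hr)]
    have hcoll : collectRefs (L ++ [(f, es)]) = es.foldl addRef (collectRefs L) := by
      unfold collectRefs
      rw [List.foldl_append]
      rfl
    rw [hcoll]
    refine List.map_congr_left ?_
    intro r _
    rw [innerFor_append L f es r]

-- ===== VERDICT (by name: the statement is the Claim_ definition above) =====
theorem reorderData_spec : Claim_equal_reorderData := by
  intro data _hdom hpre
  unfold Spec_reorderData reorderData reorderData_alt
  rw [main_fold data data [] (fun p hp => dataGet_eq data p hpre.1 hp) hpre.1
    (fun p _ q hq e he => absurd hq (List.not_mem_nil))]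
  exact outer_fold data hpre.1
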